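-- pv_equiv track=rewrite | github.com/AkerkeKesha/prognomic | medium/customer_feedback.py | categorize_score
-- ===== SOURCE A (Python) =====
-- from typing import List, Dict, Tuple
--
-- def categorize_score(scores: List[int]) -> Tuple[List, List, List]:
--     positive, neutral, negative = [], [], []
--     for idx, score in enumerate(scores):
--         if score >= 4:
--             positive.append(idx)
--         elif score == 3:
--             neutral.append(idx)
--         else:
--             negative.append(idx)
--     return positive, neutral, negative
-- ===== SOURCE B (Python) =====
-- from typing import List, Dict, Tuple
--
-- def categorize_score(scores: List[int]) -> Tuple[List, List, List]:
--     enum = list(enumerate(scores))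
--     positive = [i for i, s in enum if s >= 4]
--     neutral = [i for i, s in enum if s == 3]
--     negative = [i for i, s in enum if not (s >= 4 or s == 3)]
--     return positive, neutral, negative
-- ===== Notes on version B (the rewrite author's own statement) =====
-- stated objective: alternative
-- what changed: Replaces the single accumulator loop with one if/elif/else over three growing lists by three independent comprehensions over enumerate(scores), one per category.
import Mathlib
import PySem

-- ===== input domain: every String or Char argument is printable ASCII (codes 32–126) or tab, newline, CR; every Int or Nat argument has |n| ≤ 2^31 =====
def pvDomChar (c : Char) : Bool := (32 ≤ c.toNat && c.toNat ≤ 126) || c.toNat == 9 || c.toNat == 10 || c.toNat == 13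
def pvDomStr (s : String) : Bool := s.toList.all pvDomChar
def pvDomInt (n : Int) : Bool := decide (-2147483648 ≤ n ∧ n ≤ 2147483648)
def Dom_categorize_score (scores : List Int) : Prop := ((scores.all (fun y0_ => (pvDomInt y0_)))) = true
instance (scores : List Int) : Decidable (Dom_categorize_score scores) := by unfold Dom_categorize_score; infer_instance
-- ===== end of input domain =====

-- B replaces A's single three-way if/elif/else accumulator loop by three independent
-- comprehensions over enumerate(scores), one per category (objective: alternative).

-- ===== PORT A =====
-- one pass over enumerate(scores) with the triple of lists as loop state
def categorize_score (scores : List Int) : List Int × List Int × List Int :=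
  (PySem.List.enumerate scores).foldl
    (fun acc p =>
      if p.2 ≥ 4 then (acc.1 ++ [p.1], acc.2.1, acc.2.2)
      else if p.2 = 3 then (acc.1, acc.2.1 ++ [p.1], acc.2.2)
      else (acc.1, acc.2.1, acc.2.2 ++ [p.1]))
    ([], [], [])

-- ===== PORT B =====
-- three independent comprehensions over the same enumerated list
def categorize_score_alt (scores : List Int) : List Int × List Int × List Int :=
  let enum := PySem.List.enumerate scores
  (((enum.filter (fun p => p.2 ≥ 4)).map (fun p => p.1)),
   ((enum.filter (fun p => p.2 = 3)).map (fun p => p.1)),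
   ((enum.filter (fun p => !(p.2 ≥ 4 || p.2 = 3))).map (fun p => p.1)))

-- ===== PRECONDITION & SPEC =====
def Spec_categorize_score (scores : List Int) (out : List Int × List Int × List Int) : Prop := out = categorize_score_alt scores
instance (scores : List Int) (out : List Int × List Int × List Int) : Decidable (Spec_categorize_score scores out) := by unfold Spec_categorize_score; infer_instance

-- ===== CLAIM (what is proved, stated in full; the proofs are below) =====
def Claim_equal_categorize_score : Prop := ∀ (scores : List Int), Dom_categorize_score scores → Spec_categorize_score scores (categorize_score scores)

-- ===== LEMMAS AND PROOFS =====

-- A's fold over any enumerated pair list appends the three filtered projections to the accumulator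
lemma fold_eq_filters (l : List (Int × Int)) (a b c : List Int) :
    l.foldl
      (fun acc p =>
        if p.2 ≥ 4 then (acc.1 ++ [p.1], acc.2.1, acc.2.2)
        else if p.2 = 3 then (acc.1, acc.2.1 ++ [p.1], acc.2.2)
        else (acc.1, acc.2.1, acc.2.2 ++ [p.1]))
      (a, b, c)
    = (a ++ (l.filter (fun p => p.2 ≥ 4)).map (fun p => p.1),
       b ++ (l.filter (fun p => p.2 = 3)).map (fun p => p.1),
       c ++ (l.filter (fun p => !(p.2 ≥ 4 || p.2 = 3))).map (fun p => p.1)) := by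
  induction l generalizing a b c with
  | nil => simp
  | cons hd tl ih =>
    by_cases h4 : hd.2 ≥ 4
    · simp [List.foldl_cons, h4, ih, show ¬hd.2 = 3 by omega]
    · by_cases h3 : hd.2 = 3 <;> simp [List.foldl_cons, h4, h3, ih]

-- ===== VERDICT (by name: the statement is the Claim_ definition above) =====
theorem categorize_score_spec : Claim_equal_categorize_score := by
  intro scores _
  unfold Spec_categorize_score categorize_score categorize_score_alt
  simp [fold_eq_filters]
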